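-- pv_equiv track=rewrite | github.com/JasonYuyzy/Codes_and_Cryptography | decoder.py | decode_HY
-- ===== SOURCE A (Python) =====
-- def decode_HY(symbol_lst, s_width):
--     lst = list()
--     for symbol_group in symbol_lst:
--         symbol = 0
--         for i in range(s_width):
--             symbol += symbol_group[i]*(255**i)
--         lst.append(symbol)
--     return lst
-- ===== SOURCE B (Python) =====
-- def decode_HY(symbol_lst, s_width):
--     def horner(group, i):
--         if i >= s_width:
--             return 0
--         return group[i] + 255 * horner(group, i + 1)
--     return [horner(group, 0) for group in symbol_lst]
-- ===== Notes on version B (the rewrite author's own statement) =====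
-- stated objective: alternative
-- what changed: Per-group conversion is a recursive Horner evaluation (group[i] + 255 * rest) instead of an index loop summing group[i]*255**i, and the result list is a comprehension over the groups instead of an accumulator list with append.
import Mathlib
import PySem

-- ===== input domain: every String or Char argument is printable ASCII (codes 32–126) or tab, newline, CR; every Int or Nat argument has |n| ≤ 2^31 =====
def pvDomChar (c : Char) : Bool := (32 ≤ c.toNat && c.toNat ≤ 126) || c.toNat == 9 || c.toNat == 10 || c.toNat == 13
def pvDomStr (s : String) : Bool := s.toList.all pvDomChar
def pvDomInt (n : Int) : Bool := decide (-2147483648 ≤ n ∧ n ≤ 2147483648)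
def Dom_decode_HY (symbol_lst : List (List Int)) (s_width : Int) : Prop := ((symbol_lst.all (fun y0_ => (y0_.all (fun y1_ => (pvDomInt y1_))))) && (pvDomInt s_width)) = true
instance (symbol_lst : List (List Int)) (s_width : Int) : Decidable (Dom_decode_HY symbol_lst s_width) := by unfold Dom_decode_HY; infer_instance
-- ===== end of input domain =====

-- B converts each group by a recursive Horner evaluation (no powers) and builds the
-- output by a comprehension over the groups; an alternative decomposition, not faster.

-- ===== PORT A =====
-- symbol_group[i] is in range for every i in range(s_width) under Pre_, where pyGetD is exact.
def decode_HY (symbol_lst : List (List Int)) (s_width : Int) : List Int :=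
  symbol_lst.foldl
    (fun lst symbol_group =>
      lst ++ [(PySem.List.pyRange 0 s_width 1).foldl
        (fun symbol i => symbol + PySem.List.pyGetD symbol_group i 0 * 255 ^ i.toNat) 0])
    []

-- ===== PORT B =====
-- 'def horner(group, i)': recursion on i counting up to s_width; terminates on (s_width - i).toNat.
-- group[i] is in range whenever i < s_width under Pre_, where pyGetD is exact.
def hornerB (group : List Int) (s_width i : Int) : Int :=
  if _h : i ≥ s_width then 0
  else PySem.List.pyGetD group i 0 + 255 * hornerB group s_width (i + 1)
termination_by (s_width - i).toNat
decreasing_by omega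

def decode_HY_alt (symbol_lst : List (List Int)) (s_width : Int) : List Int :=
  symbol_lst.map (fun group => hornerB group s_width 0)

-- ===== PRECONDITION & SPEC =====
-- Pre_ excludes exactly the inputs where A (and B) raise IndexError: some group shorter than s_width.
def Pre_decode_HY (symbol_lst : List (List Int)) (s_width : Int) : Prop :=
  ∀ g ∈ symbol_lst, s_width ≤ (g.length : Int)
instance (symbol_lst : List (List Int)) (s_width : Int) : Decidable (Pre_decode_HY symbol_lst s_width) := by unfold Pre_decode_HY; infer_instance

def pvWitness_decode_HY : List (List Int) × Int := ([[1, 2], [3, 0]], 2)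

def Spec_decode_HY (symbol_lst : List (List Int)) (s_width : Int) (out : List Int) : Prop := out = decode_HY_alt symbol_lst s_width
instance (symbol_lst : List (List Int)) (s_width : Int) (out : List Int) : Decidable (Spec_decode_HY symbol_lst s_width out) := by unfold Spec_decode_HY; infer_instance

-- ===== CLAIM (what is proved, stated in full; the proofs are below) =====
def Claim_equal_decode_HY : Prop := ∀ (symbol_lst : List (List Int)) (s_width : Int), Dom_decode_HY symbol_lst s_width → Pre_decode_HY symbol_lst s_width → Spec_decode_HY symbol_lst s_width (decode_HY symbol_lst s_width)

-- ===== LEMMAS AND PROOFS =====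

-- Appending one more digit to the range adds its term to the Horner value.
theorem hornerB_snoc (g : List Int) (n : ℕ) (i : Int) (hi : 0 ≤ i) (hin : i ≤ n) :
    hornerB g ((n : Int) + 1) i = hornerB g (n : Int) i + PySem.List.pyGetD g (n : Int) 0 * 255 ^ ((n : Int) - i).toNat := by
  obtain ⟨m, hm⟩ : ∃ m : ℕ, ((n : Int) - i).toNat = m := ⟨_, rfl⟩
  induction m generalizing i with
  | zero =>
    have hni : i = (n : Int) := by omega
    subst hni
    conv_lhs => rw [hornerB]
    conv_rhs => rw [hornerB]
    rw [dif_neg (by omega : ¬ (n : Int) ≥ (n : Int) + 1), dif_pos (le_refl (n : Int)),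
        hornerB, dif_pos (by omega : (n : Int) + 1 ≥ (n : Int) + 1)]
    simp
  | succ m ih =>
    conv_lhs => rw [hornerB]
    conv_rhs => rw [hornerB]
    rw [dif_neg (by omega : ¬ i ≥ (n : Int) + 1), dif_neg (by omega : ¬ i ≥ (n : Int))]
    rw [ih (i + 1) (by omega) (by omega) (by omega)]
    have h4 : ((n : Int) - (i + 1)).toNat = m := by omega
    have h3 : ((n : Int) - i).toNat = m + 1 := by omega
    rw [h4, h3, pow_succ]
    ring

-- A's inner power-sum over range n equals B's recursive Horner value.
theorem inner_eq_nat (g : List Int) (n : ℕ) :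
    (List.range n).foldl (fun (s : Int) (k : ℕ) => s + PySem.List.pyGetD g (k : Int) 0 * 255 ^ k) 0
      = hornerB g (n : Int) 0 := by
  induction n with
  | zero => rw [hornerB]; simp
  | succ n ih =>
    rw [List.range_succ, List.foldl_append, ih]
    push_cast
    rw [hornerB_snoc g n 0 le_rfl (by omega)]
    simp

-- The two inner computations agree for every Int s_width (range empty for s_width ≤ 0).
theorem inner_eq (g : List Int) (s_width : Int) :
    (PySem.List.pyRange 0 s_width 1).foldl
        (fun symbol i => symbol + PySem.List.pyGetD g i 0 * 255 ^ i.toNat) 0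
      = hornerB g s_width 0 := by
  by_cases h : s_width ≤ 0
  · have : (PySem.List.pyRange 0 s_width 1) = [] := by
      rw [PySem.List.pyRange_one]
      simp
      omega
    rw [this, hornerB, dif_pos (by omega : 0 ≥ s_width)]
    rfl
  · have hs : ((s_width.toNat : ℕ) : Int) = s_width := by omega
    rw [PySem.List.pyRange_one, List.foldl_map]
    have := inner_eq_nat g s_width.toNat
    rw [hs] at this
    simpa using this

-- ===== VERDICT (by name: the statement is the Claim_ definition above) =====
theorem decode_HY_spec : Claim_equal_decode_HY := by
  intro symbol_lst s_width _hdom _hpre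
  unfold Spec_decode_HY decode_HY decode_HY_alt
  rw [PySem.List.foldl_append_singleton_eq_map, List.nil_append]
  exact List.map_congr_left (fun g _ => inner_eq g s_width)
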